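-- pv_equiv track=rewrite | github.com/m3rg-repo/machine_learning_glass | Revealing_the_Compositional_Control_of_Inorganic_Glass_Properties/data_visualization/tsne_all_composition.py | make_hill
-- ===== SOURCE A (Python) =====
-- def make_hill(x):
--     lable = ''
--     for i in x:
--         if i  in ['2','3','4','5','6','7','8','9']:
--             subs = "$_" + i  + "$"
--             lable = lable + subs
--         else:
--             lable = lable + i
--     return lable
-- ===== SOURCE B (Python) =====
-- def make_hill(x):
--     for d in "23456789":
--         x = x.replace(d, "$_" + d + "$")
--     return x
-- ===== Notes on version B (the rewrite author's own statement) =====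
-- stated objective: faster
-- what changed: Replaces A's single per-character Python loop with branch-and-concatenate by eight staged whole-string str.replace passes, one per digit 2-9 (correct because no replacement text contains a digit that a later pass rewrites).
import Mathlib
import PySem

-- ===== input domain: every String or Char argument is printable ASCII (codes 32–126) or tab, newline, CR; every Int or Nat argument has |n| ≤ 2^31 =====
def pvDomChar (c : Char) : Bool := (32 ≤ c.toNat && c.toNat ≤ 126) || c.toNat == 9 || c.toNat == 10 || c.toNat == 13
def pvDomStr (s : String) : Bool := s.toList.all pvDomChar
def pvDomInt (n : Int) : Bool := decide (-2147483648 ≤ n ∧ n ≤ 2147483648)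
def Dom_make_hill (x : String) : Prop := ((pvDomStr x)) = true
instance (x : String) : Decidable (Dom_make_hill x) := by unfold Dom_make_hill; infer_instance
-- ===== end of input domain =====

-- B replaces A's per-character branch-and-concatenate pass by eight staged whole-string
-- str.replace passes, one per digit 2..9 (alternative decomposition; same result).

-- ===== PORT A =====
def make_hill_loop (chars : List Char) (lable : String) : String :=
  match chars with
  | [] => lable
  | i :: rest =>
      if i ∈ ['2','3','4','5','6','7','8','9'] then
        make_hill_loop rest (lable ++ ("$_" ++ String.ofList [i] ++ "$"))
      else
        make_hill_loop rest (lable ++ String.ofList [i])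

def make_hill (x : String) : String := make_hill_loop x.toList ""

-- ===== PORT B =====
-- for d in "23456789": x = x.replace(d, "$_" + d + "$")
def make_hill_alt (x : String) : String :=
  List.foldl
    (fun s d => PySem.Str.replace s (String.ofList [d]) ("$_" ++ String.ofList [d] ++ "$"))
    x "23456789".toList

-- ===== PRECONDITION & SPEC =====
def Spec_make_hill (x : String) (out : String) : Prop := out = make_hill_alt x
instance (x : String) (out : String) : Decidable (Spec_make_hill x out) := by unfold Spec_make_hill; infer_instance

-- ===== CLAIM (what is proved, stated in full; the proofs are below) =====
def Claim_equal_make_hill : Prop := ∀ (x : String), Dom_make_hill x → Spec_make_hill x (make_hill x)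

-- ===== LEMMAS AND PROOFS =====

-- single-character replace is a per-character flatMap
theorem pv_replace_go_single (d : Char) (new : List Char) :
    ∀ (fuel : Nat) (l acc : List Char), l.length ≤ fuel →
      PySem.Chars.replace.go [d] new fuel l acc =
        acc.reverse ++ l.flatMap (fun c => if c = d then new else [c]) := by
  intro fuel
  induction fuel with
  | zero =>
      intro l acc h
      have : l = [] := List.eq_nil_of_length_eq_zero (Nat.le_zero.mp h)
      subst this
      simp [PySem.Chars.replace.go]
  | succ n ih =>
      intro l acc h
      cases l with
      | nil => simp [PySem.Chars.replace.go]
      | cons c t =>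
          have ht : t.length ≤ n := by simpa using Nat.succ_le_succ_iff.mp (by simpa using h)
          by_cases hc : c = d
          · subst hc
            have hpre : [c].isPrefixOf (c :: t) = true := by
              simp [List.isPrefixOf]
            rw [PySem.Chars.replace.go, if_pos hpre, ih _ _ (by simpa using ht)]
            simp
          · have hpre : [d].isPrefixOf (c :: t) = false := by
              simp [List.isPrefixOf, hc]
              exact fun h' => (hc h'.symm).elim
            rw [PySem.Chars.replace.go, if_neg (by simp [hpre]), ih _ _ ht]
            simp [hc]

theorem pv_replace_single (d : Char) (new l : List Char) :
    PySem.Chars.replace l [d] new = l.flatMap (fun c => if c = d then new else [c]) := by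
  rw [PySem.Chars.replace, if_neg (by simp)]
  simpa using pv_replace_go_single d new l.length l [] le_rfl

-- staged single-character replaces collapse to one per-character flatMap
theorem pv_staged (sub : Char → List Char) :
    ∀ (D : List Char), D.Nodup → (∀ d ∈ D, ∀ e ∈ sub d, e ∈ D → e = d) →
      ∀ l : List Char,
        List.foldl (fun s d => s.flatMap (fun c => if c = d then sub d else [c])) l D =
          l.flatMap (fun c => if c ∈ D then sub c else [c]) := by
  intro D
  induction D with
  | nil => intro _ _ l; simp
  | cons d rest ih =>
      intro hnd hsub l
      have hdnr : d ∉ rest := (List.nodup_cons.mp hnd).1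
      have hndr : rest.Nodup := (List.nodup_cons.mp hnd).2
      have hsubr : ∀ a ∈ rest, ∀ e ∈ sub a, e ∈ rest → e = a := by
        intro a ha e he her
        exact hsub a (List.mem_cons_of_mem _ ha) e he (List.mem_cons_of_mem _ her)
      simp only [List.foldl_cons]
      rw [ih hndr hsubr, List.flatMap_assoc]
      apply List.flatMap_congr
      intro c _
      by_cases hc : c = d
      · subst hc
        simp only [if_pos rfl, if_pos (List.mem_cons_self ..)]
        have : ∀ e ∈ sub c, (if e ∈ rest then sub e else [e]) = [e] := by
          intro e he
          rw [if_neg]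
          intro her
          exact hdnr ((hsub c (List.mem_cons_self ..) e he (List.mem_cons_of_mem _ her)) ▸ her)
        calc (sub c).flatMap (fun c => if c ∈ rest then sub c else [c])
            = (sub c).flatMap (fun e => [e]) := List.flatMap_congr this
          _ = sub c := List.flatMap_singleton' _
      · simp [hc]

-- the string-level fold of B equals the char-level fold
theorem pv_alt_fold (D : List Char) :
    ∀ s : String,
      List.foldl
        (fun s d => PySem.Str.replace s (String.ofList [d]) ("$_" ++ String.ofList [d] ++ "$"))
        s D =
      String.ofList
        (List.foldl (fun l d => PySem.Chars.replace l [d] ['$','_',d,'$']) s.toList D) := by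
  induction D with
  | nil => intro s; simp
  | cons d rest ih =>
      intro s
      simp only [List.foldl_cons]
      rw [ih]
      congr 1
      simp [PySem.Str.replace, String.toList_ofList]

-- A's loop is that same per-character flatMap
theorem pv_loop_eq (chars : List Char) (acc : String) :
    make_hill_loop chars acc =
      acc ++ String.ofList (chars.flatMap
        (fun c => if c ∈ ['2','3','4','5','6','7','8','9'] then ['$','_',c,'$'] else [c])) := by
  induction chars generalizing acc with
  | nil => simp [make_hill_loop]
  | cons i rest ih =>
      simp only [make_hill_loop]
      split_ifs with h
      · have hi : ("$_" ++ String.ofList [i] ++ "$") = String.ofList ['$','_',i,'$'] := by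
          fin_cases h <;> rfl
        rw [ih, List.flatMap_cons, if_pos h, String.ofList_append, ← hi]
        simp [String.append_assoc]
      · rw [ih, List.flatMap_cons, if_neg h, String.ofList_append]
        simp [String.append_assoc]

-- ===== VERDICT (by name: the statement is the Claim_ definition above) =====
theorem make_hill_spec : Claim_equal_make_hill := by
  intro x _
  unfold Spec_make_hill make_hill make_hill_alt
  rw [pv_loop_eq, pv_alt_fold, String.empty_append]
  have hfn : (fun (l : List Char) (d : Char) => PySem.Chars.replace l [d] ['$','_',d,'$']) =
      fun l d => l.flatMap (fun c => if c = d then ['$','_',d,'$'] else [c]) := by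
    funext l d
    exact pv_replace_single d _ l
  rw [hfn]
  have hD : ("23456789".toList : List Char) = ['2','3','4','5','6','7','8','9'] := by rfl
  rw [hD, pv_staged (fun d => ['$','_',d,'$']) ['2','3','4','5','6','7','8','9']
        (by decide)
        (by
          intro d _ e he heD
          simp only [List.mem_cons, List.not_mem_nil, or_false] at he
          rcases he with h | h | h | h
          · exact absurd (h ▸ heD) (by decide)
          · exact absurd (h ▸ heD) (by decide)
          · exact h
          · exact absurd (h ▸ heD) (by decide))]
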